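-- pv_equiv track=rewrite | github.com/nkuik/cs-crash-course | algorithm_toolbox/week_1/max_pairwise_product/max_pairwise_product_faster.py | highest_product_of_2
-- ===== SOURCE A (Python) =====
-- from itertools import islice
--
-- def highest_product_of_2(list_of_ints):
--
--     highest = max(list_of_ints[0], list_of_ints[1])
--
--     highest_of_2 = list_of_ints[0] * list_of_ints[1]
--
--     for current in islice(list_of_ints, 2, None):
--
--         highest_of_2 = max(
--             highest_of_2,
--             current * highest)
--
--         highest = max(highest, current)
--
--     return highest_of_2
-- ===== SOURCE B (Python) =====
-- def highest_product_of_2(list_of_ints):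
--     # pass 1: prefix[i] = max(list_of_ints[0..i-1]) for i >= 1 (prefix[0] unused)
--     prefix = []
--     running = list_of_ints[0]
--     for x in list_of_ints:
--         prefix.append(running)
--         running = max(running, x)
--     # pass 2: answer = max over i >= 1 of list_of_ints[i] * prefix[i]
--     best = list_of_ints[0] * list_of_ints[1]
--     for x, p in zip(list_of_ints[1:], prefix[1:]):
--         best = max(best, x * p)
--     return best
-- ===== Notes on version B (the rewrite author's own statement) =====
-- stated objective: alternative
-- what changed: A's single fused scan maintaining two running values is replaced by two separate passes: one builds an explicit prefix-maxima table, a second reduces max(list[i]*prefix[i]) over a zip of the tail with the table.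
import Mathlib
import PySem

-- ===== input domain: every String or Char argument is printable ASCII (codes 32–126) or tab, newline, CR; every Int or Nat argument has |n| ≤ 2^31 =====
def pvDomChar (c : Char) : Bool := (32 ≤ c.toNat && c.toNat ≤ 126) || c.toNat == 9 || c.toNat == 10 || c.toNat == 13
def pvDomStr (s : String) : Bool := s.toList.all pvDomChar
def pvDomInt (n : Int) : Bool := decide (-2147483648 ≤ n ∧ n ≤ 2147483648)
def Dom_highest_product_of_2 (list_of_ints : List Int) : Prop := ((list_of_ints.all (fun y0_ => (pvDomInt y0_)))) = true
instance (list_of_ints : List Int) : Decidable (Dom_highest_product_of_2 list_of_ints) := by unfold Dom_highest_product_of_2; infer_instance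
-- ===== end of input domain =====

-- B replaces A's single fused scan by an explicit prefix-maxima table plus a separate zip reduction pass (alternative decomposition, same O(n) cost); equivalence is proved for lists of length ≥ 2 (both raise IndexError below).

-- ===== PORT A =====
-- A: highest = max(l[0], l[1]); highest_of_2 = l[0]*l[1]; for current in islice(l, 2, None):
--    update (highest_of_2, highest).  The match guard only makes the port total; Pre_ excludes length < 2.
def highest_product_of_2 (list_of_ints : List Int) : Int :=
  match list_of_ints with
  | a0 :: a1 :: rest =>
      (rest.foldl
        (fun (s : Int × Int) current => (max s.1 (current * s.2), max s.2 current))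
        (a0 * a1, max a0 a1)).1
  | _ => 0

-- ===== PORT B =====
-- B pass 1: build prefix table by appending the running maximum; pass 2: fold max(best, x*p) over zip(l[1:], prefix[1:]).
def highest_product_of_2_alt (list_of_ints : List Int) : Int :=
  match list_of_ints with
  | [] => 0
  | [_] => 0
  | a0 :: a1 :: _ =>
      let prefixTbl :=
        (list_of_ints.foldl
          (fun (s : List Int × Int) x => (s.1 ++ [s.2], max s.2 x))
          (([] : List Int), a0)).1
      (((PySem.List.slice list_of_ints (some 1) none).zip
          (PySem.List.slice prefixTbl (some 1) none)).foldl
        (fun best xp => max best (xp.1 * xp.2)) (a0 * a1))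

-- ===== PRECONDITION & SPEC =====
-- Pre_: both programs index l[0] and l[1] (IndexError on shorter lists).
def Pre_highest_product_of_2 (list_of_ints : List Int) : Prop := 2 ≤ list_of_ints.length
instance (list_of_ints : List Int) : Decidable (Pre_highest_product_of_2 list_of_ints) := by
  unfold Pre_highest_product_of_2; infer_instance
def pvWitness_highest_product_of_2 : List Int := [3, -1, 4]
def Spec_highest_product_of_2 (list_of_ints : List Int) (out : Int) : Prop := out = highest_product_of_2_alt list_of_ints
instance (list_of_ints : List Int) (out : Int) : Decidable (Spec_highest_product_of_2 list_of_ints out) := by unfold Spec_highest_product_of_2; infer_instance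

-- ===== CLAIM (what is proved, stated in full; the proofs are below) =====
def Claim_equal_highest_product_of_2 : Prop := ∀ (list_of_ints : List Int), Dom_highest_product_of_2 list_of_ints → Pre_highest_product_of_2 list_of_ints → Spec_highest_product_of_2 list_of_ints (highest_product_of_2 list_of_ints)

-- ===== LEMMAS AND PROOFS =====

-- running-maximum scan: entry before consuming each element
def pvScan (r : Int) : List Int → List Int
  | [] => []
  | x :: xs => r :: pvScan (max r x) xs

theorem pvScan_build (l : List Int) : ∀ (acc : List Int) (r : Int),
    (l.foldl (fun (s : List Int × Int) x => (s.1 ++ [s.2], max s.2 x)) (acc, r)).1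
      = acc ++ pvScan r l := by
  induction l with
  | nil => intro acc r; simp [pvScan]
  | cons x xs ih =>
      intro acc r
      simp only [List.foldl_cons, pvScan]
      rw [ih]
      simp

theorem pvFold_eq (rest : List Int) : ∀ (h2 r : Int),
    (rest.foldl (fun (s : Int × Int) c => (max s.1 (c * s.2), max s.2 c)) (h2, r)).1
      = ((rest.zip (pvScan r rest)).foldl (fun best xp => max best (xp.1 * xp.2)) h2) := by
  induction rest with
  | nil => intro h2 r; simp [pvScan]
  | cons x xs ih =>
      intro h2 r
      simp only [List.foldl_cons, pvScan, List.zip_cons_cons]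
      exact ih (max h2 (x * r)) (max r x)

-- ===== VERDICT (by name: the statement is the Claim_ definition above) =====
theorem highest_product_of_2_spec : Claim_equal_highest_product_of_2 := by
  intro l _ hpre
  unfold Spec_highest_product_of_2
  match l, hpre with
  | a0 :: a1 :: rest, _ =>
      unfold highest_product_of_2 highest_product_of_2_alt
      simp only []
      rw [pvScan_build, PySem.List.slice_from_one, PySem.List.slice_from_one]
      simp only [List.nil_append, pvScan, List.tail_cons, max_self,
        List.zip_cons_cons, List.foldl_cons]
      rw [pvFold_eq]
      have : max (a0 * a1) (a1 * a0) = a0 * a1 := by rw [mul_comm a1 a0, max_self]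
      rw [this]
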